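-- pv_equiv track=rewrite | github.com/sarath805/codemind-python | Count_of_the_non-prime_divisors_of_a_given_number.py | non_prime
-- ===== SOURCE A (Python) =====
-- def non_prime(n):
--     s = 0
--     for i in range(1,n+1):
--         if n%i == 0:
--             s = s+1
--     if s>2:
--         return True
--     else:
--         return False
-- ===== SOURCE B (Python) =====
-- def non_prime(n):
--     # n has more than two divisors iff n >= 4 and n is composite,
--     # i.e. n has a divisor d with 2 <= d and d*d <= n.
--     if n < 4:
--         return False
--     i = 2
--     while i * i <= n:
--         if n % i == 0:
--             return True
--         i += 1
--     return False
-- ===== Notes on version B (the rewrite author's own statement) =====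
-- stated objective: faster
-- what changed: Instead of counting every divisor of n by trial division over the whole range 1..n, B uses that n has more than two divisors exactly when it is a composite number of size at least four, and searches for a nontrivial divisor only up to the square root of n with early exit.
import Mathlib
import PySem

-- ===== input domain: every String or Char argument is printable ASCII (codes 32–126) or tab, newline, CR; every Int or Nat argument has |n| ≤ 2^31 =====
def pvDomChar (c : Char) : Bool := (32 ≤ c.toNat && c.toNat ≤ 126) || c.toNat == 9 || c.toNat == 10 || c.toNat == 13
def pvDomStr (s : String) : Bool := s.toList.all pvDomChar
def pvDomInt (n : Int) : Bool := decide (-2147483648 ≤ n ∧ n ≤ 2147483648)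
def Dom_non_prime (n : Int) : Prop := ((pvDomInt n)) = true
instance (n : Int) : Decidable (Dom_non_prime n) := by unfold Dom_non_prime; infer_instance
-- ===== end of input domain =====

-- B changes the algorithm: instead of counting all divisors in 1..n, it searches for a
-- nontrivial divisor up to √n (n has >2 divisors iff n ≥ 4 and such a divisor exists).

-- ===== PORT A =====
def non_prime (n : Int) : Bool :=
  let s := (PySem.List.pyRange 1 (n + 1) 1).foldl
    (fun s i => if PySem.Int.mod n i == 0 then s + 1 else s) (0 : Int)
  if s > 2 then true else false

-- ===== PORT B =====
-- the 'while i*i <= n' loop of Source B; the hypothesis 2 ≤ i is carried only for termination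
def nonPrimeLoop (n : Int) : (i : Int) → 2 ≤ i → Bool := fun i h =>
  if hle : i * i ≤ n then
    (if PySem.Int.mod n i == 0 then true else nonPrimeLoop n (i + 1) (by omega))
  else false
termination_by i _ => (n + 1 - i).toNat
decreasing_by
  have hi : i ≤ n := by nlinarith
  omega

def non_prime_alt (n : Int) : Bool :=
  if n < 4 then false else nonPrimeLoop n 2 (by omega)

-- ===== PRECONDITION & SPEC =====
def Spec_non_prime (n : Int) (out : Bool) : Prop := out = non_prime_alt n
instance (n : Int) (out : Bool) : Decidable (Spec_non_prime n out) := by unfold Spec_non_prime; infer_instance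

-- ===== CLAIM (what is proved, stated in full; the proofs are below) =====
def Claim_equal_non_prime : Prop := ∀ (n : Int), Dom_non_prime n → Spec_non_prime n (non_prime n)

-- ===== LEMMAS AND PROOFS =====

-- the counting fold of A is a countP
theorem foldl_count (n : Int) (l : List Int) (s : Int) :
    l.foldl (fun s i => if PySem.Int.mod n i == 0 then s + 1 else s) s
      = s + (l.countP (fun i => PySem.Int.mod n i == 0) : Int) := by
  induction l generalizing s with
  | nil => simp
  | cons x t ih =>
    simp only [List.foldl_cons, List.countP_cons, ih]
    by_cases h : PySem.Int.mod n x == 0 <;> simp [h] <;> ring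

-- characterisation of A: true iff more than two divisors in [1, n]
theorem nonprime_iff_count (n : Int) :
    non_prime n = true ↔
      2 < ((PySem.List.pyRange 1 (n + 1) 1).countP (fun i => PySem.Int.mod n i == 0) : Int) := by
  simp only [non_prime, foldl_count, zero_add]
  split <;> simp_all

-- "more than two divisors in [1,n]" iff "some divisor d with 2 ≤ d, d*d ≤ n"
theorem count_iff_small_divisor (n : Int) :
    (2 < ((PySem.List.pyRange 1 (n + 1) 1).countP (fun i => PySem.Int.mod n i == 0) : Int)) ↔
      ∃ d : Int, 2 ≤ d ∧ d * d ≤ n ∧ PySem.Int.mod n d = 0 := by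
  set l := PySem.List.pyRange 1 (n + 1) 1 with hl
  set fl := l.filter (fun i => PySem.Int.mod n i == 0) with hfl
  have hnodup : fl.Nodup := (PySem.List.nodup_pyRange_one 1 (n + 1)).filter _
  have hmemfl : ∀ d : Int, d ∈ fl ↔ (1 ≤ d ∧ d ≤ n ∧ d ∣ n) := by
    intro d
    simp only [hfl, List.mem_filter, hl, PySem.List.mem_pyRange_one, beq_iff_eq,
      PySem.Int.mod_eq_zero_iff_dvd]
    exact ⟨fun ⟨⟨h1, h2⟩, h3⟩ => ⟨h1, by omega, h3⟩, fun ⟨h1, h2, h3⟩ => ⟨⟨h1, by omega⟩, h3⟩⟩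
  have hcount : (l.countP (fun i => PySem.Int.mod n i == 0)) = fl.length := by
    rw [hfl, List.countP_eq_length_filter]
  rw [hcount]
  constructor
  · intro hlen
    have hlen3 : 3 ≤ fl.length := by omega
    -- some divisor in fl is neither 1 nor n
    have hex : ∃ d ∈ fl, d ≠ 1 ∧ d ≠ n := by
      by_contra hc
      push Not at hc
      have hsub : fl.toFinset ⊆ ({1, n} : Finset Int) := by
        intro x hx
        have hx' := hc x (List.mem_toFinset.mp hx)
        simp only [Finset.mem_insert, Finset.mem_singleton]
        by_cases h1 : x = 1
        · exact Or.inl h1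
        · exact Or.inr (hx' h1)
      have := Finset.card_le_card hsub
      rw [List.toFinset_card_of_nodup hnodup] at this
      have : ({1, n} : Finset Int).card ≤ 2 := Finset.card_insert_le _ _ |>.trans (by simp)
      omega
    obtain ⟨d, hdfl, hd1, hdn⟩ := hex
    obtain ⟨hd1', hdn', hdvd⟩ := (hmemfl d).mp hdfl
    have hd2 : 2 ≤ d := by omega
    have hdlt : d < n := by omega
    rcases le_or_gt (d * d) n with hdd | hdd
    · exact ⟨d, hd2, hdd, (PySem.Int.mod_eq_zero_iff_dvd n d).mpr hdvd⟩
    · obtain ⟨e, he⟩ := hdvd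
      refine ⟨e, ?_, ?_, (PySem.Int.mod_eq_zero_iff_dvd n e).mpr ⟨d, by linarith [he]⟩⟩
      · nlinarith
      · nlinarith
  · rintro ⟨d, hd2, hdd, hmod⟩
    have hdvd : d ∣ n := (PySem.Int.mod_eq_zero_iff_dvd n d).mp hmod
    have hn4 : 4 ≤ n := by nlinarith
    have hdlt : d < n := by nlinarith
    have hsub : ({1, d, n} : Finset Int) ⊆ fl.toFinset := by
      intro x hx
      simp only [Finset.mem_insert, Finset.mem_singleton] at hx
      apply List.mem_toFinset.mpr
      rcases hx with rfl | rfl | rfl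
      · exact (hmemfl 1).mpr ⟨le_refl _, by omega, one_dvd n⟩
      · exact (hmemfl x).mpr ⟨by omega, by omega, hdvd⟩
      · exact (hmemfl x).mpr ⟨by omega, le_refl _, dvd_refl _⟩
    have hcard : ({1, d, n} : Finset Int).card = 3 := by
      rw [Finset.card_insert_of_notMem (by simp; omega),
          Finset.card_insert_of_notMem (by simp; omega), Finset.card_singleton]
    have := Finset.card_le_card hsub
    rw [List.toFinset_card_of_nodup hnodup, hcard] at this
    omega

-- characterisation of B's loop
theorem loop_iff (n : Int) (i : Int) (h : 2 ≤ i) :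
    nonPrimeLoop n i h = true ↔ ∃ d : Int, i ≤ d ∧ d * d ≤ n ∧ PySem.Int.mod n d = 0 := by
  fun_induction nonPrimeLoop n i h with
  | case1 i h hle hmod =>
    simp only [beq_iff_eq] at hmod
    exact iff_of_true rfl ⟨i, le_refl _, hle, hmod⟩
  | case2 i h hle hmod ih =>
    simp only [beq_iff_eq] at hmod
    rw [ih]
    constructor
    · rintro ⟨d, hd, hdd, hm⟩; exact ⟨d, by omega, hdd, hm⟩
    · rintro ⟨d, hd, hdd, hm⟩
      refine ⟨d, ?_, hdd, hm⟩
      rcases eq_or_lt_of_le hd with rfl | h'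
      · exact absurd hm hmod
      · omega
  | case3 i h hle =>
    simp only [Bool.false_eq_true, false_iff]
    rintro ⟨d, hd, hdd, -⟩
    nlinarith

theorem alt_iff (n : Int) :
    non_prime_alt n = true ↔ ∃ d : Int, 2 ≤ d ∧ d * d ≤ n ∧ PySem.Int.mod n d = 0 := by
  unfold non_prime_alt
  split
  · rename_i h
    constructor
    · simp
    · rintro ⟨d, hd2, hdd, -⟩
      exfalso; nlinarith
  · exact loop_iff n 2 (by omega)

-- ===== VERDICT (by name: the statement is the Claim_ definition above) =====
theorem non_prime_spec : Claim_equal_non_prime := by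
  intro n _
  unfold Spec_non_prime
  have hA := nonprime_iff_count n
  have hB := alt_iff n
  have h := (hA.trans (count_iff_small_divisor n)).trans hB.symm
  cases hA' : non_prime n <;> cases hB' : non_prime_alt n <;> simp_all
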